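-- pv_equiv track=rewrite | github.com/smatkovi/valhalla-bike-router | opt/valhalla-bike-router/geocoder_offline.py | _type_to_category
-- ===== SOURCE A (Python) =====
-- def _type_to_category(type_name: str) -> str:
--     """Convert type name to a simple category for UI."""
--     if not type_name:
--         return 'place'
--
--     type_lower = type_name.lower()
--
--     # Transport
--     if any(x in type_lower for x in ['station', 'stop', 'terminal', 'airport', 'aerodrome', 'helipad']):
--         return 'transport'
--     if 'parking' in type_lower:
--         return 'parking'
--
--     # Food & Drink
--     if any(x in type_lower for x in ['restaurant', 'cafe', 'bar', 'pub', 'fast_food', 'biergarten']):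
--         return 'food'
--
--     # Shopping
--     if 'shop' in type_lower or 'supermarket' in type_lower or 'mall' in type_lower:
--         return 'shop'
--
--     # Accommodation
--     if any(x in type_lower for x in ['hotel', 'hostel', 'guest', 'camp', 'motel']):
--         return 'accommodation'
--
--     # POI / Tourism
--     if any(x in type_lower for x in ['tourism', 'museum', 'attraction', 'viewpoint', 'castle', 'monument']):
--         return 'tourism'
--
--     # Nature
--     if any(x in type_lower for x in ['park', 'forest', 'water', 'river', 'lake', 'mountain', 'peak']):
--         return 'nature'
--
--     # Admin boundaries
--     if 'admin' in type_lower or 'boundary' in type_lower: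
--         return 'admin'
--
--     # Address / Street
--     if any(x in type_lower for x in ['house', 'address', 'street', 'road', 'highway', 'path', 'residential']):
--         return 'address'
--
--     # Amenities
--     if any(x in type_lower for x in ['school', 'university', 'hospital', 'pharmacy', 'bank', 'post']):
--         return 'amenity'
--
--     # Sports/Leisure
--     if any(x in type_lower for x in ['sport', 'pitch', 'stadium', 'swimming', 'golf', 'leisure']):
--         return 'leisure'
--
--     return 'place'
-- ===== SOURCE B (Python) =====
-- CATEGORIES = ['transport', 'parking', 'food', 'shop', 'accommodation', 'tourism',
--               'nature', 'admin', 'address', 'amenity', 'leisure']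
--
-- # Flat keyword -> priority index (into CATEGORIES), in the original priority order.
-- KEYWORDS = [
--     ('station', 0), ('stop', 0), ('terminal', 0), ('airport', 0), ('aerodrome', 0), ('helipad', 0),
--     ('parking', 1),
--     ('restaurant', 2), ('cafe', 2), ('bar', 2), ('pub', 2), ('fast_food', 2), ('biergarten', 2),
--     ('shop', 3), ('supermarket', 3), ('mall', 3),
--     ('hotel', 4), ('hostel', 4), ('guest', 4), ('camp', 4), ('motel', 4),
--     ('tourism', 5), ('museum', 5), ('attraction', 5), ('viewpoint', 5), ('castle', 5), ('monument', 5),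
--     ('park', 6), ('forest', 6), ('water', 6), ('river', 6), ('lake', 6), ('mountain', 6), ('peak', 6),
--     ('admin', 7), ('boundary', 7),
--     ('house', 8), ('address', 8), ('street', 8), ('road', 8), ('highway', 8), ('path', 8), ('residential', 8),
--     ('school', 9), ('university', 9), ('hospital', 9), ('pharmacy', 9), ('bank', 9), ('post', 9),
--     ('sport', 10), ('pitch', 10), ('stadium', 10), ('swimming', 10), ('golf', 10), ('leisure', 10),
-- ]
--
-- def _type_to_category(type_name: str) -> str:
--     """Convert type name to a simple category for UI."""
--     if not type_name:
--         return 'place'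
--     type_lower = type_name.lower()
--     # Single left-to-right scan over string positions, keeping the best
--     # (lowest) priority of any keyword that starts at some position.
--     best = len(CATEGORIES)
--     for i in range(len(type_lower)):
--         for kw, pri in KEYWORDS:
--             if type_lower.startswith(kw, i):
--                 best = min(best, pri)
--     return CATEGORIES[best] if best < len(CATEGORIES) else 'place'
-- ===== Notes on version B (the rewrite author's own statement) =====
-- stated objective: alternative
-- what changed: Instead of A's early-return chain of per-category substring searches, B makes one left-to-right scan over the string's positions, matching a flat prioritized keyword table at each position and keeping the minimum priority found; the category is read off once at the end.
import Mathlib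
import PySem

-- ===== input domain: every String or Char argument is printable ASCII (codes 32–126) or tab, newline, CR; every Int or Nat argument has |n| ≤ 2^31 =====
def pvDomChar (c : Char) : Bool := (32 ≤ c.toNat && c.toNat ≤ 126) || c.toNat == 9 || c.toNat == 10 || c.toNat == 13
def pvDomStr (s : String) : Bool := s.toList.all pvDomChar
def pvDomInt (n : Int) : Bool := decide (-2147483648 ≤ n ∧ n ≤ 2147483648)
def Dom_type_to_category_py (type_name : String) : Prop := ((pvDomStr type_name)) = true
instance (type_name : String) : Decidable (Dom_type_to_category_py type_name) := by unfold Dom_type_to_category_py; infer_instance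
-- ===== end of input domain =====

-- B replaces A's early-return chain of per-category substring searches by one
-- left-to-right scan over string positions with a flat prioritized keyword table
-- and a min-priority accumulator (objective: alternative); same return values.

-- ===== PORT A =====
def type_to_category_py (type_name : String) : String :=
  if type_name = "" then "place"
  else
    let type_lower := PySem.Str.lower type_name
    if ["station", "stop", "terminal", "airport", "aerodrome", "helipad"].any
        (fun x => PySem.Str.isIn x type_lower) then "transport"
    else if PySem.Str.isIn "parking" type_lower then "parking"
    else if ["restaurant", "cafe", "bar", "pub", "fast_food", "biergarten"].any
        (fun x => PySem.Str.isIn x type_lower) then "food"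
    else if PySem.Str.isIn "shop" type_lower || PySem.Str.isIn "supermarket" type_lower
        || PySem.Str.isIn "mall" type_lower then "shop"
    else if ["hotel", "hostel", "guest", "camp", "motel"].any
        (fun x => PySem.Str.isIn x type_lower) then "accommodation"
    else if ["tourism", "museum", "attraction", "viewpoint", "castle", "monument"].any
        (fun x => PySem.Str.isIn x type_lower) then "tourism"
    else if ["park", "forest", "water", "river", "lake", "mountain", "peak"].any
        (fun x => PySem.Str.isIn x type_lower) then "nature"
    else if PySem.Str.isIn "admin" type_lower || PySem.Str.isIn "boundary" type_lower then "admin"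
    else if ["house", "address", "street", "road", "highway", "path", "residential"].any
        (fun x => PySem.Str.isIn x type_lower) then "address"
    else if ["school", "university", "hospital", "pharmacy", "bank", "post"].any
        (fun x => PySem.Str.isIn x type_lower) then "amenity"
    else if ["sport", "pitch", "stadium", "swimming", "golf", "leisure"].any
        (fun x => PySem.Str.isIn x type_lower) then "leisure"
    else "place"

-- ===== PORT B =====
-- CATEGORIES from Source B
def pvCategories : List String :=
  ["transport", "parking", "food", "shop", "accommodation", "tourism",
   "nature", "admin", "address", "amenity", "leisure"]

-- KEYWORDS from Source B: flat (keyword, priority) table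
def pvKeywords : List (String × Nat) :=
  [("station", 0), ("stop", 0), ("terminal", 0), ("airport", 0), ("aerodrome", 0), ("helipad", 0),
   ("parking", 1),
   ("restaurant", 2), ("cafe", 2), ("bar", 2), ("pub", 2), ("fast_food", 2), ("biergarten", 2),
   ("shop", 3), ("supermarket", 3), ("mall", 3),
   ("hotel", 4), ("hostel", 4), ("guest", 4), ("camp", 4), ("motel", 4),
   ("tourism", 5), ("museum", 5), ("attraction", 5), ("viewpoint", 5), ("castle", 5), ("monument", 5),
   ("park", 6), ("forest", 6), ("water", 6), ("river", 6), ("lake", 6), ("mountain", 6), ("peak", 6),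
   ("admin", 7), ("boundary", 7),
   ("house", 8), ("address", 8), ("street", 8), ("road", 8), ("highway", 8), ("path", 8), ("residential", 8),
   ("school", 9), ("university", 9), ("hospital", 9), ("pharmacy", 9), ("bank", 9), ("post", 9),
   ("sport", 10), ("pitch", 10), ("stadium", 10), ("swimming", 10), ("golf", 10), ("leisure", 10)]

-- inner 'for kw, pri in KEYWORDS: if type_lower.startswith(kw, i): best = min(best, pri)'
-- type_lower.startswith(kw, i) is a prefix test on the suffix starting at i, which is
-- exactly PySem.Chars.startswith on the suffix (exact)
def pvInner (l : List Char) (b : Nat) : Nat :=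
  pvKeywords.foldl (fun b kp => if PySem.Chars.startswith l kp.1.toList then min b kp.2 else b) b

-- outer 'for i in range(len(type_lower))' as structural recursion over the suffixes
def pvScan (l : List Char) (b : Nat) : Nat :=
  match l with
  | [] => b
  | _ :: r => pvScan r (pvInner l b)

def type_to_category_py_alt (type_name : String) : String :=
  if type_name = "" then "place"
  else
    let best := pvScan (PySem.Str.lower type_name).toList pvCategories.length
    -- 'CATEGORIES[best] if best < len(CATEGORIES) else "place"': in-range list index
    if best < pvCategories.length then pvCategories.getD best "place" else "place"

-- ===== PRECONDITION & SPEC =====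
def Spec_type_to_category_py (type_name : String) (out : String) : Prop := out = type_to_category_py_alt type_name
instance (type_name : String) (out : String) : Decidable (Spec_type_to_category_py type_name out) := by unfold Spec_type_to_category_py; infer_instance

-- ===== CLAIM (what is proved, stated in full; the proofs are below) =====
def Claim_equal_type_to_category_py : Prop := ∀ (type_name : String), Dom_type_to_category_py type_name → Spec_type_to_category_py type_name (type_to_category_py type_name)

-- ===== LEMMAS AND PROOFS =====

-- the keyword fold with an arbitrary Bool test on the keyword
def pvGFold (q : String → Bool) (K : List (String × Nat)) (b : Nat) : Nat :=
  K.foldl (fun b kp => if q kp.1 then min b kp.2 else b) b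

theorem pvGFold_min (q : String → Bool) (K : List (String × Nat)) :
    ∀ b c, pvGFold q K (min b c) = min c (pvGFold q K b) := by
  induction K with
  | nil => intro b c; simp [pvGFold, Nat.min_comm]
  | cons kp K ih =>
    intro b c
    simp only [pvGFold, List.foldl_cons] at *
    by_cases h : q kp.1
    · simpa [h, Nat.min_assoc, Nat.min_comm c kp.2] using ih (min b kp.2) c
    · simpa [h] using ih b c

theorem pvGFold_false (q : String → Bool) (K : List (String × Nat))
    (h : ∀ kp ∈ K, q kp.1 = false) : ∀ b, pvGFold q K b = b := by
  induction K with
  | nil => intro b; rfl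
  | cons kp K ih =>
    intro b
    simp only [pvGFold, List.foldl_cons, h kp (by simp), Bool.false_eq_true, if_false]
    exact ih (fun x hx => h x (by simp [hx])) b

theorem pvGFold_split (q1 q2 q3 : String → Bool) (K : List (String × Nat))
    (h : ∀ kp ∈ K, q1 kp.1 = (q2 kp.1 || q3 kp.1)) :
    ∀ b, pvGFold q1 K b = pvGFold q3 K (pvGFold q2 K b) := by
  induction K with
  | nil => intro b; rfl
  | cons kp K ih =>
    intro b
    have hmem : ∀ x ∈ K, q1 x.1 = (q2 x.1 || q3 x.1) := fun x hx => h x (by simp [hx])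
    have hk := h kp (by simp)
    have e : ∀ (q : String → Bool) (b : Nat),
        pvGFold q (kp :: K) b = pvGFold q K (if q kp.1 then min b kp.2 else b) :=
      fun q b => rfl
    rw [e q1, e q2, e q3, hk]
    by_cases h2 : q2 kp.1
    · by_cases h3 : q3 kp.1
      · simp only [h2, h3, Bool.true_or, if_true, ih hmem]
        congr 1
        have key : pvGFold q2 K (min b kp.2) = min kp.2 (pvGFold q2 K (min b kp.2)) := by
          calc pvGFold q2 K (min b kp.2)
              = pvGFold q2 K (min (min b kp.2) kp.2) := by rw [Nat.min_assoc, Nat.min_self]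
            _ = min kp.2 (pvGFold q2 K (min b kp.2)) := pvGFold_min q2 K (min b kp.2) kp.2
        rw [Nat.min_comm (pvGFold q2 K (min b kp.2)) kp.2, ← key]
      · simp [h2, h3, ih hmem]
    · by_cases h3 : q3 kp.1
      · simp only [h2, h3, Bool.false_or, if_true, Bool.false_eq_true, if_false, ih hmem]
        congr 1
        rw [pvGFold_min q2 K b kp.2, Nat.min_comm]
      · simp [h2, h3, ih hmem]

-- keyword substring test on a cons splits into prefix-here plus substring-of-tail
theorem pv_isIn_cons (sub : List Char) (c : Char) (r : List Char) :
    PySem.Chars.isIn sub (c :: r) =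
      (PySem.Chars.startswith (c :: r) sub || PySem.Chars.isIn sub r) := by
  rcases h : PySem.Chars.isIn sub (c :: r) with _ | _
  · have := (PySem.Chars.isIn_eq_false_iff _ _).mp h
    rw [List.infix_cons_iff] at this
    push Not at this
    have h1 : PySem.Chars.startswith (c :: r) sub = false := by
      rcases hb : PySem.Chars.startswith (c :: r) sub with _ | _
      · rfl
      · exact absurd ((PySem.Chars.startswith_iff _ _).mp hb) this.1
    have h2 : PySem.Chars.isIn sub r = false :=
      (PySem.Chars.isIn_eq_false_iff _ _).mpr this.2
    simp [h1, h2]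
  · have := (PySem.Chars.isIn_iff_infix _ _).mp h
    rw [List.infix_cons_iff] at this
    rcases this with hp | hi
    · simp [(PySem.Chars.startswith_iff _ _).mpr hp]
    · simp [(PySem.Chars.isIn_iff_infix _ _).mpr hi]

-- the position scan computes the keyword fold with the substring ('in') test
theorem pvScan_eq (l : List Char) : ∀ b,
    pvScan l b = pvGFold (fun kw => PySem.Chars.isIn kw.toList l) pvKeywords b := by
  induction l with
  | nil =>
    intro b
    rw [pvScan, pvGFold_false]
    decide
  | cons c r ih =>
    intro b
    rw [pvScan, ih]
    exact (pvGFold_split _ (fun kw => PySem.Chars.startswith (c :: r) kw.toList)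
      (fun kw => PySem.Chars.isIn kw.toList r) pvKeywords
      (fun kp _ => pv_isIn_cons kp.1.toList c r) b).symm

-- a block of keywords sharing one priority folds to a single any-test
theorem pvBlock (q : String → Bool) (p : Nat) (blk : List String) :
    ∀ b, List.foldl (fun b kw => if q kw then min b p else b) b blk =
      if blk.any q then min b p else b := by
  induction blk with
  | nil => intro b; simp
  | cons k blk ih =>
    intro b
    by_cases h : q k
    · simp [h, ih]
    · simp [h, ih]

-- pvKeywords as eleven constant-priority blocks
theorem pvKeywords_eq : pvKeywords =
    (["station", "stop", "terminal", "airport", "aerodrome", "helipad"].map (·, 0)) ++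
    (["parking"].map (·, 1)) ++
    (["restaurant", "cafe", "bar", "pub", "fast_food", "biergarten"].map (·, 2)) ++
    (["shop", "supermarket", "mall"].map (·, 3)) ++
    (["hotel", "hostel", "guest", "camp", "motel"].map (·, 4)) ++
    (["tourism", "museum", "attraction", "viewpoint", "castle", "monument"].map (·, 5)) ++
    (["park", "forest", "water", "river", "lake", "mountain", "peak"].map (·, 6)) ++
    (["admin", "boundary"].map (·, 7)) ++
    (["house", "address", "street", "road", "highway", "path", "residential"].map (·, 8)) ++
    (["school", "university", "hospital", "pharmacy", "bank", "post"].map (·, 9)) ++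
    (["sport", "pitch", "stadium", "swimming", "golf", "leisure"].map (·, 10)) := rfl

-- ===== VERDICT (by name: the statement is the Claim_ definition above) =====
set_option maxHeartbeats 4000000 in
theorem type_to_category_py_spec : Claim_equal_type_to_category_py := by
  intro s _
  unfold Spec_type_to_category_py type_to_category_py type_to_category_py_alt
  by_cases h : s = ""
  · simp [h]
  · simp only [h, if_false]
    rw [pvScan_eq, pvGFold, pvKeywords_eq]
    simp only [List.foldl_append, List.foldl_map, List.any_cons, List.any_nil,
      Bool.or_false, Bool.or_assoc, PySem.Str.isIn_eq, pvBlock]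
    generalize (PySem.Chars.isIn "station".toList (PySem.Str.lower s).toList || (PySem.Chars.isIn "stop".toList (PySem.Str.lower s).toList || (PySem.Chars.isIn "terminal".toList (PySem.Str.lower s).toList || (PySem.Chars.isIn "airport".toList (PySem.Str.lower s).toList || (PySem.Chars.isIn "aerodrome".toList (PySem.Str.lower s).toList || PySem.Chars.isIn "helipad".toList (PySem.Str.lower s).toList))))) = b0
    generalize PySem.Chars.isIn "parking".toList (PySem.Str.lower s).toList = b1
    generalize (PySem.Chars.isIn "restaurant".toList (PySem.Str.lower s).toList || (PySem.Chars.isIn "cafe".toList (PySem.Str.lower s).toList || (PySem.Chars.isIn "bar".toList (PySem.Str.lower s).toList || (PySem.Chars.isIn "pub".toList (PySem.Str.lower s).toList || (PySem.Chars.isIn "fast_food".toList (PySem.Str.lower s).toList || PySem.Chars.isIn "biergarten".toList (PySem.Str.lower s).toList))))) = b2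
    generalize (PySem.Chars.isIn "shop".toList (PySem.Str.lower s).toList || (PySem.Chars.isIn "supermarket".toList (PySem.Str.lower s).toList || PySem.Chars.isIn "mall".toList (PySem.Str.lower s).toList)) = b3
    generalize (PySem.Chars.isIn "hotel".toList (PySem.Str.lower s).toList || (PySem.Chars.isIn "hostel".toList (PySem.Str.lower s).toList || (PySem.Chars.isIn "guest".toList (PySem.Str.lower s).toList || (PySem.Chars.isIn "camp".toList (PySem.Str.lower s).toList || PySem.Chars.isIn "motel".toList (PySem.Str.lower s).toList)))) = b4
    generalize (PySem.Chars.isIn "tourism".toList (PySem.Str.lower s).toList || (PySem.Chars.isIn "museum".toList (PySem.Str.lower s).toList || (PySem.Chars.isIn "attraction".toList (PySem.Str.lower s).toList || (PySem.Chars.isIn "viewpoint".toList (PySem.Str.lower s).toList || (PySem.Chars.isIn "castle".toList (PySem.Str.lower s).toList || PySem.Chars.isIn "monument".toList (PySem.Str.lower s).toList))))) = b5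
    generalize (PySem.Chars.isIn "park".toList (PySem.Str.lower s).toList || (PySem.Chars.isIn "forest".toList (PySem.Str.lower s).toList || (PySem.Chars.isIn "water".toList (PySem.Str.lower s).toList || (PySem.Chars.isIn "river".toList (PySem.Str.lower s).toList || (PySem.Chars.isIn "lake".toList (PySem.Str.lower s).toList || (PySem.Chars.isIn "mountain".toList (PySem.Str.lower s).toList || PySem.Chars.isIn "peak".toList (PySem.Str.lower s).toList)))))) = b6
    generalize (PySem.Chars.isIn "admin".toList (PySem.Str.lower s).toList || PySem.Chars.isIn "boundary".toList (PySem.Str.lower s).toList) = b7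
    generalize (PySem.Chars.isIn "house".toList (PySem.Str.lower s).toList || (PySem.Chars.isIn "address".toList (PySem.Str.lower s).toList || (PySem.Chars.isIn "street".toList (PySem.Str.lower s).toList || (PySem.Chars.isIn "road".toList (PySem.Str.lower s).toList || (PySem.Chars.isIn "highway".toList (PySem.Str.lower s).toList || (PySem.Chars.isIn "path".toList (PySem.Str.lower s).toList || PySem.Chars.isIn "residential".toList (PySem.Str.lower s).toList)))))) = b8
    generalize (PySem.Chars.isIn "school".toList (PySem.Str.lower s).toList || (PySem.Chars.isIn "university".toList (PySem.Str.lower s).toList || (PySem.Chars.isIn "hospital".toList (PySem.Str.lower s).toList || (PySem.Chars.isIn "pharmacy".toList (PySem.Str.lower s).toList || (PySem.Chars.isIn "bank".toList (PySem.Str.lower s).toList || PySem.Chars.isIn "post".toList (PySem.Str.lower s).toList))))) = b9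
    generalize (PySem.Chars.isIn "sport".toList (PySem.Str.lower s).toList || (PySem.Chars.isIn "pitch".toList (PySem.Str.lower s).toList || (PySem.Chars.isIn "stadium".toList (PySem.Str.lower s).toList || (PySem.Chars.isIn "swimming".toList (PySem.Str.lower s).toList || (PySem.Chars.isIn "golf".toList (PySem.Str.lower s).toList || PySem.Chars.isIn "leisure".toList (PySem.Str.lower s).toList))))) = b10
    revert b0 b1 b2 b3 b4 b5 b6 b7 b8 b9 b10
    decide
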